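-- pv_equiv track=rewrite | github.com/Kubikuli/Python_practice | proj/isj_proj3_xlucnyj00.py | halves_of_even_double_of_odd
-- ===== SOURCE A (Python) =====
-- def halves_of_even_double_of_odd(numbers: list[int]) -> list[int]:
--     """Re-arranges and re-calculates the given list of integers so that
--        halves of even numbers will go first, followed by doubles of odd ones
--
--     >>> halves_of_even_double_of_odd([2,4,2,5,6])
--     [1, 2, 1, 3, 10]
--     >>> halves_of_even_double_of_odd([3,2,0,5,4])
--     [1, 0, 2, 6, 10]
--     >>> halves_of_even_double_of_odd([2])
--     [1]
--     >>> halves_of_even_double_of_odd([])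
--     []
--     >>> halves_of_even_double_of_odd([3])
--     [6]
--     """
--     odd_numbers = []
--     even_numbers = []
--
--     for i in range(len(numbers)):
--         if numbers[i] % 2 == 0:
--             even_numbers.append(numbers[i] // 2)
--         else:
--             odd_numbers.append(numbers[i] * 2)
--
--     return even_numbers + odd_numbers
-- ===== SOURCE B (Python) =====
-- def halves_of_even_double_of_odd(numbers: list[int]) -> list[int]:
--     """Two filtered passes: halves of evens, then doubles of odds."""
--     return [n // 2 for n in numbers if n % 2 == 0] + \
--            [n * 2 for n in numbers if n % 2 != 0]
-- ===== Notes on version B (the rewrite author's own statement) =====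
-- stated objective: idiomatic
-- what changed: Replaces the single index-based loop that maintains two accumulator lists with two independent filtered comprehensions over the list, concatenated evens-first.
import Mathlib
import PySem

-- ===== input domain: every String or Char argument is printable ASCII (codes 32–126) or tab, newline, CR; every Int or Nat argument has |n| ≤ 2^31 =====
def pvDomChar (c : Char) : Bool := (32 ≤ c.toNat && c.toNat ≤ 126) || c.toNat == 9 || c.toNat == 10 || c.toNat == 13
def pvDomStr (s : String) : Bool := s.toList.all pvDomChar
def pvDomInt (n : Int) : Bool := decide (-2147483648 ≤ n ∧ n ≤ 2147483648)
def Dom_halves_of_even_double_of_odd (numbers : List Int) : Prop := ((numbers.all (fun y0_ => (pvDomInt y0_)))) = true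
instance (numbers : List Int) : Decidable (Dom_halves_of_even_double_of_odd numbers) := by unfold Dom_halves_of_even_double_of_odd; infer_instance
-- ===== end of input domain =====

-- B replaces A's single index loop with two accumulators by two filtered passes concatenated evens-first (idiomatic decomposition).

-- ===== PORT A =====
-- index loop over range(len(numbers)), state = (even_numbers, odd_numbers)
def halves_of_even_double_of_odd (numbers : List Int) : List Int :=
  let st := (PySem.List.pyRange 0 (PySem.List.len numbers) 1).foldl
    (fun (st : List Int × List Int) i =>
      let x := PySem.List.pyGetD numbers i 0
      if PySem.Int.mod x 2 = 0 then (st.1 ++ [PySem.Int.floordiv x 2], st.2)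
      else (st.1, st.2 ++ [x * 2])) ([], [])
  st.1 ++ st.2

-- ===== PORT B =====
def halves_of_even_double_of_odd_alt (numbers : List Int) : List Int :=
  ((numbers.filter (fun n => PySem.Int.mod n 2 = 0)).map (fun n => PySem.Int.floordiv n 2)) ++
  ((numbers.filter (fun n => ¬ PySem.Int.mod n 2 = 0)).map (fun n => n * 2))

-- ===== PRECONDITION & SPEC =====
def Spec_halves_of_even_double_of_odd (numbers : List Int) (out : List Int) : Prop := out = halves_of_even_double_of_odd_alt numbers
instance (numbers : List Int) (out : List Int) : Decidable (Spec_halves_of_even_double_of_odd numbers out) := by unfold Spec_halves_of_even_double_of_odd; infer_instance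

-- ===== CLAIM (what is proved, stated in full; the proofs are below) =====
def Claim_equal_halves_of_even_double_of_odd : Prop := ∀ (numbers : List Int), Dom_halves_of_even_double_of_odd numbers → Spec_halves_of_even_double_of_odd numbers (halves_of_even_double_of_odd numbers)

-- ===== LEMMAS AND PROOFS =====

theorem pv_loop_inv (numbers : List Int) (e o : List Int) :
    numbers.foldl
      (fun (st : List Int × List Int) x =>
        if PySem.Int.mod x 2 = 0 then (st.1 ++ [PySem.Int.floordiv x 2], st.2)
        else (st.1, st.2 ++ [x * 2])) (e, o)
    = (e ++ (numbers.filter (fun n => PySem.Int.mod n 2 = 0)).map (fun n => PySem.Int.floordiv n 2),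
       o ++ (numbers.filter (fun n => ¬ PySem.Int.mod n 2 = 0)).map (fun n => n * 2)) := by
  induction numbers generalizing e o with
  | nil => simp
  | cons x xs ih =>
    by_cases h : PySem.Int.mod x 2 = 0
    · rw [List.foldl_cons, if_pos h, ih]
      simp only [List.filter_cons, h, not_true_eq_false, decide_false, decide_true,
        if_true, if_false, Bool.false_eq_true, List.map_cons, List.append_assoc,
        List.singleton_append]
    · rw [List.foldl_cons, if_neg h, ih]
      simp only [List.filter_cons, h, not_false_eq_true, decide_false, decide_true,
        if_true, if_false, Bool.false_eq_true, List.map_cons, List.append_assoc,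
        List.singleton_append]

theorem halves_of_even_double_of_odd_spec : Claim_equal_halves_of_even_double_of_odd := by
  intro numbers _
  unfold Spec_halves_of_even_double_of_odd halves_of_even_double_of_odd halves_of_even_double_of_odd_alt
  rw [PySem.List.foldl_pyRange_zero_pyGetD numbers 0
    (fun (st : List Int × List Int) x =>
      if PySem.Int.mod x 2 = 0 then (st.1 ++ [PySem.Int.floordiv x 2], st.2)
      else (st.1, st.2 ++ [x * 2])) ([], []), pv_loop_inv]
  simp
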